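-- pv_equiv track=rewrite | github.com/wmeijer221/aoc-24 | day-7/main.py | can_calculate
-- ===== SOURCE A (Python) =====
-- def can_calculate(y, leftX, rightX) -> bool:
--     ele = rightX[0]
--     rightX = rightX[1:]
--
--     leftXAdd = ele + leftX
--     leftXMult = ele * leftX
--
--     if len(rightX) == 0:
--         return leftXAdd == y or leftXMult == y
--
--     can_calculate_add = leftXAdd <= y and can_calculate(y, leftXAdd, rightX)
--     can_calculate_mult = leftXMult <= y and can_calculate(y, leftXMult, rightX)
--
--     return can_calculate_add or can_calculate_mult
-- ===== SOURCE B (Python) =====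
-- def can_calculate(y, leftX, rightX) -> bool:
--     # Set-based DP: track the distinct reachable partial values (pruned to <= y,
--     # as A prunes) instead of recursing over the operator-choice tree.
--     vals = {leftX}
--     for ele in rightX[:-1]:
--         vals = {r for v in vals for r in (ele + v, ele * v) if r <= y}
--     last = rightX[-1]
--     return any(last + v == y or last * v == y for v in vals)
-- ===== Notes on version B (the rewrite author's own statement) =====
-- stated objective: alternative
-- what changed: Replaced the binary recursion over operator choices with an iterative set-based DP that keeps the distinct reachable partial values per position (pruned to <= y exactly as A prunes); it trades A's depth-first short-circuiting for breadth-first deduplicated frontiers.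
import Mathlib
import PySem

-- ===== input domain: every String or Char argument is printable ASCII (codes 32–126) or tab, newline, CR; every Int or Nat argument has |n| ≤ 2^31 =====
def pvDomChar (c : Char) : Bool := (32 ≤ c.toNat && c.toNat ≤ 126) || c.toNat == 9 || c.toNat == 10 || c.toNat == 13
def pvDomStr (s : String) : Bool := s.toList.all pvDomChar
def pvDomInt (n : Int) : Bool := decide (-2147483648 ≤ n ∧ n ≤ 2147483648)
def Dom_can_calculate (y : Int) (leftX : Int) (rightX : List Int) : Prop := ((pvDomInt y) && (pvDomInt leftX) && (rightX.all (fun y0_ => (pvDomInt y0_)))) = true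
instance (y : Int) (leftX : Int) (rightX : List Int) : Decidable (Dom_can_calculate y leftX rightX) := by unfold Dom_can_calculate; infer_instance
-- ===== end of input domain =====

-- B replaces A's operator-choice recursion by an iterative set-based DP over the distinct
-- reachable partial values (pruned to ≤ y exactly as A prunes); objective: alternative.
-- Both A and B raise IndexError on rightX = [] (rightX[0] / rightX[-1]); Pre_ excludes it.

-- ===== PORT A =====
def can_calculate (y : Int) (leftX : Int) (rightX : List Int) : Bool :=
  match rightX with
  | [] => false  -- Python raises IndexError at rightX[0]; excluded by Pre_can_calculate
  | ele :: rest =>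
    let leftXAdd := ele + leftX
    let leftXMult := ele * leftX
    if rest.length = 0 then
      (leftXAdd == y) || (leftXMult == y)
    else
      let can_calculate_add := decide (leftXAdd ≤ y) && can_calculate y leftXAdd rest
      let can_calculate_mult := decide (leftXMult ≤ y) && can_calculate y leftXMult rest
      can_calculate_add || can_calculate_mult

-- ===== PORT B =====
-- one loop iteration: vals = {r for v in vals for r in (ele + v, ele * v) if r <= y}
def pvAltStep (y : Int) (vals : PySem.Set Int) (ele : Int) : PySem.Set Int :=
  PySem.Set.ofList ((vals.flatMap (fun v => [ele + v, ele * v])).filter (fun r => decide (r ≤ y)))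

def can_calculate_alt (y : Int) (leftX : Int) (rightX : List Int) : Bool :=
  -- rightX[:-1] = rightX.dropLast; rightX[-1] raises IndexError on [] (excluded by Pre_)
  let vals := rightX.dropLast.foldl (pvAltStep y) (PySem.Set.ofList [leftX])
  match rightX.getLast? with
  | none => false  -- Python raises IndexError at rightX[-1]; excluded by Pre_can_calculate
  | some last => vals.any (fun v => (last + v == y) || (last * v == y))

-- ===== PRECONDITION & SPEC =====
-- Both A and B raise IndexError on the empty list; exactly that input is excluded.
def Pre_can_calculate (y : Int) (leftX : Int) (rightX : List Int) : Prop := rightX ≠ []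
instance (y : Int) (leftX : Int) (rightX : List Int) : Decidable (Pre_can_calculate y leftX rightX) := by unfold Pre_can_calculate; infer_instance
def pvWitness_can_calculate : Int × Int × List Int := (9, 1, [2, 3])

def Spec_can_calculate (y : Int) (leftX : Int) (rightX : List Int) (out : Bool) : Prop := out = can_calculate_alt y leftX rightX
instance (y : Int) (leftX : Int) (rightX : List Int) (out : Bool) : Decidable (Spec_can_calculate y leftX rightX out) := by unfold Spec_can_calculate; infer_instance

-- ===== CLAIM (what is proved, stated in full; the proofs are below) =====
def Claim_equal_can_calculate : Prop := ∀ (y : Int) (leftX : Int) (rightX : List Int), Dom_can_calculate y leftX rightX → Pre_can_calculate y leftX rightX → Spec_can_calculate y leftX rightX (can_calculate y leftX rightX)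

-- ===== LEMMAS AND PROOFS =====

-- membership through one DP step
theorem pv_mem_altStep (y ele w : Int) (vals : PySem.Set Int) :
    w ∈ pvAltStep y vals ele ↔ ∃ v ∈ vals, w ≤ y ∧ (w = ele + v ∨ w = ele * v) := by
  simp only [pvAltStep, PySem.Set.mem_ofList, List.mem_filter, List.mem_flatMap]
  constructor
  · rintro ⟨⟨v, hv, hw⟩, hle⟩
    refine ⟨v, hv, by simpa using hle, ?_⟩
    simpa using hw
  · rintro ⟨v, hv, hle, hw⟩
    exact ⟨⟨v, hv, by simpa using hw⟩, by simpa using hle⟩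

-- the DP over xs ++ [last] finds y iff some starting value succeeds in A's recursion
theorem pv_loop_char (y : Int) (xs : List Int) (last : Int) (vals : PySem.Set Int) :
    ((xs.foldl (pvAltStep y) vals).any (fun v => (last + v == y) || (last * v == y)) = true)
      ↔ ∃ v ∈ vals, can_calculate y v (xs ++ [last]) = true := by
  induction xs generalizing vals with
  | nil =>
    simp only [List.foldl_nil, List.any_eq_true, List.nil_append]
    constructor
    · rintro ⟨v, hv, h⟩
      exact ⟨v, hv, by simp [can_calculate]; simpa using h⟩
    · rintro ⟨v, hv, h⟩
      refine ⟨v, hv, ?_⟩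
      simp only [can_calculate] at h
      simpa using h
  | cons e xs ih =>
    simp only [List.foldl_cons, List.cons_append]
    rw [ih]
    constructor
    · rintro ⟨w, hw, hrec⟩
      rw [pv_mem_altStep] at hw
      obtain ⟨v, hv, hle, hw⟩ := hw
      refine ⟨v, hv, ?_⟩
      simp only [can_calculate]
      have hne : (xs ++ [last]).length ≠ 0 := by simp
      rw [if_neg hne]
      rcases hw with h | h
      · subst h; simp [hle, hrec]
      · subst h; simp [hle, hrec]
    · rintro ⟨v, hv, h⟩
      simp only [can_calculate] at h
      have hne : (xs ++ [last]).length ≠ 0 := by simp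
      rw [if_neg hne] at h
      simp only [Bool.or_eq_true, Bool.and_eq_true, decide_eq_true_eq] at h
      rcases h with ⟨hle, hrec⟩ | ⟨hle, hrec⟩
      · exact ⟨e + v, (pv_mem_altStep y e (e + v) vals).2 ⟨v, hv, hle, Or.inl rfl⟩, hrec⟩
      · exact ⟨e * v, (pv_mem_altStep y e (e * v) vals).2 ⟨v, hv, hle, Or.inr rfl⟩, hrec⟩

-- ===== VERDICT (by name: the statement is the Claim_ definition above) =====
theorem can_calculate_spec : Claim_equal_can_calculate := by
  intro y leftX rightX _ hpre
  unfold Spec_can_calculate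
  obtain ⟨xs, last, rfl⟩ : ∃ xs last, rightX = xs ++ [last] := by
    rcases List.eq_nil_or_concat rightX with h | ⟨xs, last, h⟩
    · exact absurd h hpre
    · exact ⟨xs, last, by simpa using h⟩
  unfold can_calculate_alt
  rw [List.dropLast_concat, List.getLast?_concat]
  have hchar := pv_loop_char y xs last (PySem.Set.ofList [leftX])
  have hstart : ∀ v, v ∈ PySem.Set.ofList [leftX] ↔ v = leftX := by
    intro v; simp [PySem.Set.mem_ofList]
  rcases hA : can_calculate y leftX (xs ++ [last]) with _ | _
  · simp only []
    rcases hB : (xs.foldl (pvAltStep y) (PySem.Set.ofList [leftX])).any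
        (fun v => (last + v == y) || (last * v == y)) with _ | _
    · rfl
    · exfalso
      obtain ⟨v, hv, h⟩ := hchar.1 hB
      rw [hstart] at hv; subst hv
      rw [hA] at h; exact Bool.false_ne_true h
  · simp only []
    exact (hchar.2 ⟨leftX, (hstart leftX).2 rfl, hA⟩).symm
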